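-- pv_equiv track=rewrite | github.com/nemesmarci/Advent-of-Code-2023 | 14/common.py | weight
-- ===== SOURCE A (Python) =====
-- def get_col(x, area):
--     return [area[y][x] for y in range(len(area))]
--
-- def weight(area):
--     w = 0
--     for x in range(len(area[0])):
--         col = get_col(x, area)
--         for i in range(len(col), 0, -1):
--             if col[len(col) - i] == 'O':
--                 w += i
--     return w
-- ===== SOURCE B (Python) =====
-- def weight(area):
--     rows = len(area)
--     cols = len(area[0]) if area else 0
--     return sum((rows - y) * row[:cols].count('O') for y, row in enumerate(area))
-- ===== Notes on version B (the rewrite author's own statement) =====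
-- stated objective: simpler
-- what changed: Row-major single pass replacing the column-major nested scan: every 'O' in row y weighs rows-y, so B sums (rows-y)*count of 'O' per row (over the grid's width = len(area[0])) instead of extracting each column and walking it with a countdown index.
import Mathlib
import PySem

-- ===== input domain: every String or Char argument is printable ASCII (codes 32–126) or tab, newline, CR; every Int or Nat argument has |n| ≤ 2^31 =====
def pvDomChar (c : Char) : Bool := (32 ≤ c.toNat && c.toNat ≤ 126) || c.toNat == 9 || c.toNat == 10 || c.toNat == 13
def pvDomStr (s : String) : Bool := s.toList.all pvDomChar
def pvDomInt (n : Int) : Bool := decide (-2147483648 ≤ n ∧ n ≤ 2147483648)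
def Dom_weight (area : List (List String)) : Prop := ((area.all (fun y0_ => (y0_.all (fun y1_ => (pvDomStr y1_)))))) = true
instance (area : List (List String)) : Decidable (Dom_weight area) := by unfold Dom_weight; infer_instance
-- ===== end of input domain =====

-- B replaces A's column-major nested scan with a single row-major pass (weight (rows-y) times count per row); objective: simpler.

-- ===== PORT A =====
def getCol (x : Int) (area : List (List String)) : List String :=
  (PySem.List.pyRange 0 (area.length : Int)).map
    (fun y => PySem.List.pyGetD (PySem.List.pyGetD area y []) x "")

def weight (area : List (List String)) : Int :=
  (PySem.List.pyRange 0 ((area.headD []).length : Int)).foldl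
    (fun w x =>
      let col := getCol x area
      (PySem.List.pyRange (col.length : Int) 0 (-1)).foldl
        (fun w i => if PySem.List.pyGetD col ((col.length : Int) - i) "" = "O" then w + i else w)
        w)
    0

-- ===== PORT B =====
def weight_alt (area : List (List String)) : Int :=
  let rows : Int := (area.length : Int)
  let cols : Int := if area.isEmpty then 0 else ((area.headD []).length : Int)
  ((PySem.List.enumerate area).map
    (fun p => (rows - p.1) * ((PySem.List.slice p.2 none (some cols)).count "O" : Int))).sum

-- ===== PRECONDITION & SPEC =====
-- Pre_ excludes exactly the inputs on which A raises IndexError: the empty grid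
-- (len(area[0])) and ragged grids where some row is shorter than the first row.
def Pre_weight (area : List (List String)) : Prop :=
  area ≠ [] ∧ ∀ row ∈ area, (area.headD []).length ≤ row.length
instance (area : List (List String)) : Decidable (Pre_weight area) := by unfold Pre_weight; infer_instance

def pvWitness_weight : List (List String) := [["O", "."], [".", "O"]]

def Spec_weight (area : List (List String)) (out : Int) : Prop := out = weight_alt area
instance (area : List (List String)) (out : Int) : Decidable (Spec_weight area out) := by unfold Spec_weight; infer_instance

-- ===== CLAIM (what is proved, stated in full; the proofs are below) =====
def Claim_equal_weight : Prop := ∀ (area : List (List String)), Dom_weight area → Pre_weight area → Spec_weight area (weight area)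

-- ===== LEMMAS AND PROOFS =====

def cellW (area : List (List String)) (x y : Nat) : Int :=
  if PySem.List.pyGetD (PySem.List.pyGetD area (y : Int) []) (x : Int) "" = "O"
  then ((area.length : Int) - (y : Int)) else 0

lemma length_getCol (x : Int) (area : List (List String)) :
    (getCol x area).length = area.length := by
  simp [getCol, PySem.List.pyRange_one]

lemma inner_generic (col : List String) (w : Int) :
    (PySem.List.pyRange ((col.length : Int)) 0 (-1)).foldl
      (fun w i => if PySem.List.pyGetD col (((col.length : Int)) - i) "" = "O" then w + i else w) w
    = w + ∑ y ∈ Finset.range col.length,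
        (if PySem.List.pyGetD col ((y : Int)) "" = "O" then ((col.length : Int) - (y : Int)) else 0) := by
  have hf : (fun (w i : Int) => if PySem.List.pyGetD col (((col.length : Int)) - i) "" = "O" then w + i else w)
      = (fun (w i : Int) => w + (if PySem.List.pyGetD col (((col.length : Int)) - i) "" = "O" then i else 0)) := by
    funext w i; split <;> simp
  rw [hf, PySem.List.foldl_add, PySem.List.pyRange_neg_one]
  simp only [List.map_map, Int.sub_zero, Int.toNat_natCast, Function.comp_def, sub_sub_cancel]
  rfl

lemma col_entry (area : List (List String)) (x : Int) (y : Nat) (hy : y < area.length) :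
    PySem.List.pyGetD (getCol x area) (y : Int) "" =
      PySem.List.pyGetD (PySem.List.pyGetD area (y : Int) []) x "" := by
  unfold getCol
  exact PySem.List.pyGetD_map_pyRange _ area.length y "" hy

lemma inner_loop_eq (area : List (List String)) (x : Int) (w : Int) :
    (PySem.List.pyRange (((getCol x area).length : Int)) 0 (-1)).foldl
      (fun w i => if PySem.List.pyGetD (getCol x area) ((((getCol x area).length : Int)) - i) "" = "O" then w + i else w) w
    = w + ∑ y ∈ Finset.range area.length,
        (if PySem.List.pyGetD (PySem.List.pyGetD area (y : Int) []) x "" = "O"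
         then ((area.length : Int) - (y : Int)) else 0) := by
  rw [inner_generic]
  congr 1
  rw [length_getCol]
  refine Finset.sum_congr rfl ?_
  intro y hy
  rw [Finset.mem_range] at hy
  rw [col_entry area x y hy]

lemma weight_eq_sum (area : List (List String)) :
    weight area = ∑ x ∈ Finset.range (area.headD []).length,
                    ∑ y ∈ Finset.range area.length, cellW area x y := by
  unfold weight
  have hf : (fun (w x : Int) =>
      let col := getCol x area
      (PySem.List.pyRange ((col.length : Int)) 0 (-1)).foldl
        (fun w i => if PySem.List.pyGetD col (((col.length : Int)) - i) "" = "O" then w + i else w) w)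
      = (fun (w x : Int) => w + ∑ y ∈ Finset.range area.length,
          (if PySem.List.pyGetD (PySem.List.pyGetD area (y : Int) []) x "" = "O"
           then ((area.length : Int) - (y : Int)) else 0)) := by
    funext w x; exact inner_loop_eq area x w
  rw [hf, PySem.List.foldl_add, PySem.List.pyRange_zero_nat, List.map_map]
  simp only [zero_add, Function.comp_def]
  rfl

lemma take_eq_map_range (m : ℕ) (row : List String) (h : m ≤ row.length) :
    List.take m row = (List.range m).map (fun x => row.getD x "") := by
  apply List.ext_getElem
  · simp [h]
  · intro i h1 h2
    simp at h2 ⊢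
    rw [List.getElem?_eq_getElem (by omega)]
    rfl

lemma count_take_eq_sum (m : ℕ) (row : List String) (h : m ≤ row.length) :
    ((List.take m row).count "O" : ℤ) =
      ∑ x ∈ Finset.range m, (if row.getD x "" = "O" then (1 : ℤ) else 0) := by
  rw [List.count_eq_countP, ← PySem.List.sum_map_ite_one_zero (fun c => c == "O") (List.take m row)]
  rw [take_eq_map_range m row h, List.map_map]
  simp only [Function.comp_def, beq_iff_eq]
  rfl

lemma weight_alt_eq_sum (area : List (List String)) (h : Pre_weight area) :
    weight_alt area = ∑ y ∈ Finset.range area.length,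
                        ∑ x ∈ Finset.range (area.headD []).length, cellW area x y := by
  obtain ⟨hne, hall⟩ := h
  simp only [weight_alt, List.isEmpty_iff, hne, if_false]
  rw [PySem.List.enumerate_eq_map_pyRange area [], List.map_map]
  rw [show PySem.List.len area = (area.length : Int) from rfl,
      PySem.List.pyRange_zero_nat, List.map_map]
  have step : ∀ y ∈ Finset.range area.length,
      ((area.length : Int) - (y : Int)) *
        ((PySem.List.slice (PySem.List.pyGetD area (y : Int) []) none
            (some ((area.headD []).length : Int))).count "O" : Int)
      = ∑ x ∈ Finset.range (area.headD []).length, cellW area x y := by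
    intro y hy
    rw [Finset.mem_range] at hy
    have hrow : PySem.List.pyGetD area (y : Int) [] = area[y] := by
      rw [PySem.List.pyGetD_natCast, List.getD_eq_getElem area [] hy]
    have hb : (area.headD []).length ≤ (area[y]'hy).length :=
      hall _ (List.getElem_mem hy)
    rw [hrow, PySem.List.slice_to_natCast, count_take_eq_sum _ _ hb, Finset.mul_sum]
    refine Finset.sum_congr rfl ?_
    intro x hx
    simp only [cellW, PySem.List.pyGetD_natCast, List.getD_eq_getElem area [] hy,
      mul_ite, mul_one, mul_zero]
  rw [← Finset.sum_congr rfl step]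
  rfl

-- ===== VERDICT (by name: the statement is the Claim_ definition above) =====
theorem weight_spec : Claim_equal_weight := by
  intro area _ hpre
  unfold Spec_weight
  rw [weight_eq_sum area, weight_alt_eq_sum area hpre, Finset.sum_comm]
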